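-- pv_equiv track=rewrite | github.com/mahimaallu16/Anti_virus | app.py | is_legitimate_api_usage
-- ===== SOURCE A (Python) =====
-- def is_legitimate_api_usage(content, file_path):
--     """Enhanced API detection that reduces false positives"""
--     try:
--         dangerous_apis = [
--             'CreateRemoteThread', 'VirtualAlloc', 'WriteProcessMemory',
--             'SetWindowsHookEx', 'GetProcAddress', 'LoadLibrary',
--             'CreateProcess', 'ShellExecute', 'WinExec'
--         ]
--
--         # Count dangerous API usage
--         api_count = sum(1 for api in dangerous_apis if api in content)
--
--         # Only flag if multiple dangerous APIs are used together
--         if api_count >= 2: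
--             # Additional check: look for suspicious combinations
--             suspicious_combinations = [
--                 ('VirtualAlloc', 'WriteProcessMemory'),
--                 ('LoadLibrary', 'GetProcAddress'),
--                 ('CreateRemoteThread', 'VirtualAlloc'),
--             ]
--
--             for combo in suspicious_combinations:
--                 if all(api in content for api in combo):
--                     return True
--
--         return False
--     except Exception:
--         return False
-- ===== SOURCE B (Python) =====
-- def is_legitimate_api_usage(content, file_path):
--     """Enhanced API detection that reduces false positives"""
--     try:
--         # Closed-form boolean formula: only five substrings can influence the
--         # result.  Each suspicious combination is two distinct dangerous APIs,
--         # so a combination match already implies A's api_count >= 2 threshold;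
--         # no keyword list, no counting pass, no combination loop.
--         va = 'VirtualAlloc' in content
--         return ((va and 'WriteProcessMemory' in content)
--                 or ('LoadLibrary' in content and 'GetProcAddress' in content)
--                 or (va and 'CreateRemoteThread' in content))
--     except Exception:
--         return False
-- ===== Notes on version B (the rewrite author's own statement) =====
-- stated objective: simpler
-- what changed: B replaces A's count-then-threshold pass and combination loop over two keyword tables with a single closed-form boolean formula over the only five substrings that can decide the result (a combo match already implies api_count >= 2).
import Mathlib
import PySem

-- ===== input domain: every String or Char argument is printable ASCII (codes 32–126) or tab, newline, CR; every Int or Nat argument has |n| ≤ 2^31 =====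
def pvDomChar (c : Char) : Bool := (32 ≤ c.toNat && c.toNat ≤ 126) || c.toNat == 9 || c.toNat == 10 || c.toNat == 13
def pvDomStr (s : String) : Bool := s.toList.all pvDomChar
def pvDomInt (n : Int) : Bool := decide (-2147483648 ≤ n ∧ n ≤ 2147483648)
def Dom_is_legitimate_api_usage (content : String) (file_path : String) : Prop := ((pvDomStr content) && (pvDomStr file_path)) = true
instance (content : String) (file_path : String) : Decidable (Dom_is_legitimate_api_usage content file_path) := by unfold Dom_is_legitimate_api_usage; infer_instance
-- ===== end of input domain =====

-- B replaces A's count-then-threshold pass and combination loop with one closed-form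
-- boolean formula over the five substrings that can decide the result (simpler).
-- Both Pythons' try/except is unreachable on string inputs (the domain), so it is not ported.

-- ===== PORT A =====
def pvDangerousApis : List String :=
  ["CreateRemoteThread", "VirtualAlloc", "WriteProcessMemory",
   "SetWindowsHookEx", "GetProcAddress", "LoadLibrary",
   "CreateProcess", "ShellExecute", "WinExec"]

def pvSuspiciousCombos : List (String × String) :=
  [("VirtualAlloc", "WriteProcessMemory"),
   ("LoadLibrary", "GetProcAddress"),
   ("CreateRemoteThread", "VirtualAlloc")]

-- 'for combo in suspicious_combinations: if all(...): return True' — early-return loop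
def pvComboLoop (content : String) : List (String × String) → Bool
  | [] => false
  | combo :: rest =>
    if PySem.Str.isIn combo.1 content && PySem.Str.isIn combo.2 content then true
    else pvComboLoop content rest

def is_legitimate_api_usage (content : String) (file_path : String) : Bool :=
  -- api_count = sum(1 for api in dangerous_apis if api in content)
  let api_count : Int :=
    (pvDangerousApis.map (fun api => if PySem.Str.isIn api content then (1 : Int) else 0)).sum
  if 2 ≤ api_count then pvComboLoop content pvSuspiciousCombos
  else false

-- ===== PORT B =====
def is_legitimate_api_usage_alt (content : String) (file_path : String) : Bool :=
  let va := PySem.Str.isIn "VirtualAlloc" content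
  (va && PySem.Str.isIn "WriteProcessMemory" content)
    || (PySem.Str.isIn "LoadLibrary" content && PySem.Str.isIn "GetProcAddress" content)
    || (va && PySem.Str.isIn "CreateRemoteThread" content)

-- ===== PRECONDITION & SPEC =====
def Spec_is_legitimate_api_usage (content : String) (file_path : String) (out : Bool) : Prop := out = is_legitimate_api_usage_alt content file_path
instance (content : String) (file_path : String) (out : Bool) : Decidable (Spec_is_legitimate_api_usage content file_path out) := by unfold Spec_is_legitimate_api_usage; infer_instance

-- ===== CLAIM (what is proved, stated in full; the proofs are below) =====
def Claim_equal_is_legitimate_api_usage : Prop := ∀ (content : String) (file_path : String), Dom_is_legitimate_api_usage content file_path → Spec_is_legitimate_api_usage content file_path (is_legitimate_api_usage content file_path)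

-- ===== LEMMAS AND PROOFS =====
-- All that matters is which of the nine dangerous-API substrings occur in content:
-- generalize those nine booleans and check all 512 cases by kernel evaluation.
-- ===== VERDICT (by name: the statement is the Claim_ definition above) =====
theorem is_legitimate_api_usage_spec : Claim_equal_is_legitimate_api_usage := by
  intro content file_path _
  unfold Spec_is_legitimate_api_usage is_legitimate_api_usage is_legitimate_api_usage_alt
  simp only [pvDangerousApis, pvSuspiciousCombos, pvComboLoop,
    List.map, List.sum_cons, List.sum_nil]
  generalize PySem.Str.isIn "CreateRemoteThread" content = b1
  generalize PySem.Str.isIn "VirtualAlloc" content = b2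
  generalize PySem.Str.isIn "WriteProcessMemory" content = b3
  generalize PySem.Str.isIn "SetWindowsHookEx" content = b4
  generalize PySem.Str.isIn "GetProcAddress" content = b5
  generalize PySem.Str.isIn "LoadLibrary" content = b6
  generalize PySem.Str.isIn "CreateProcess" content = b7
  generalize PySem.Str.isIn "ShellExecute" content = b8
  generalize PySem.Str.isIn "WinExec" content = b9
  revert b1 b2 b3 b4 b5 b6 b7 b8 b9
  decide
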